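-- pv_equiv track=rewrite | github.com/Vagacoder/Codesignal | python/Arcade/Core/C93CyclicString.py | cyclicString
-- ===== SOURCE A (Python) =====
-- def cyclicString(s: str) -> int:
--
--     def removeExtra(s1: str) -> str:
--         index = -1
--         n = len(s1)
--         for i in range(1, n):
--             curStr = s1[:i]
--             if s1.endswith(curStr):
--                 if i != n-1:
--                     index = i
--                 else:
--                     if index >= 0:
--                         index = i
--         if index >= 0:
--             return s1[index:]
--         else:
--             return s1
--
--     return len(removeExtra(s))
-- ===== SOURCE B (Python) =====
-- def cyclicString(s: str) -> int:
--     n = len(s)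
--     for p in range(1, n + 1):
--         if all(s[j] == s[j - p] for j in range(p, n)):
--             return p
--     return n
-- ===== Notes on version B (the rewrite author's own statement) =====
-- stated objective: alternative
-- what changed: A enumerates all prefixes ascending, materialising each prefix slice and running endswith to track the largest border index, then slices; B scans candidate periods ascending and returns the first p whose character-wise shift test s[j]==s[j-p] holds (the smallest period directly, with early exit at the first mismatch).
-- intended difference: On length-2 strings with both characters equal (e.g. 'aa') A returns 2 because its loop refuses to record a border at index n-1 unless a smaller one exists, while B returns the intended smallest period 1 ('aa' is generated cyclically by 'a'). — e.g. on cyclicString("aa"): A returns 2, B returns 1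
import Mathlib
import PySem

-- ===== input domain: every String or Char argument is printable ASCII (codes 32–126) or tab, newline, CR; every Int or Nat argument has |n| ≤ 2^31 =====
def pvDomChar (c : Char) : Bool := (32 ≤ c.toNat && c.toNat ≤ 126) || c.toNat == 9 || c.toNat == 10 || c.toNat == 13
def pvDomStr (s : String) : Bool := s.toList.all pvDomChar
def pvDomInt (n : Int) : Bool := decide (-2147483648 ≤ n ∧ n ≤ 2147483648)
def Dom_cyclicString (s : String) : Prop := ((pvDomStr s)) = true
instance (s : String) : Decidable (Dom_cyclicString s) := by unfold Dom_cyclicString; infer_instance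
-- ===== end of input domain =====

-- B replaces A's largest-border search (build each prefix, test endswith, track the last border
-- index, slice) by a direct smallest-period scan with early exit (objective: alternative); on
-- two-equal-char strings of length 2 A returns 2 while B returns the intended period 1 (see D_).


-- ===== PORT A =====
def cyclicString (s : String) : Int :=
  let l := s.toList
  let n : Int := l.length
  let index : Int := (PySem.List.pyRange 1 n 1).foldl (fun index i =>
      let curStr := PySem.List.slice l none (some i)
      if PySem.Chars.endswith l curStr then
        if i ≠ (l.length : Int) - 1 then i
        else if index ≥ 0 then i else index
      else index) (-1)
  let res := if index ≥ 0 then PySem.List.slice l (some index) none else l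
  (res.length : Int)

-- ===== PORT B =====
-- all(s[j] == s[j - p] for j in range(p, n))
def pvCheck (l : List Char) (n p : Int) : Bool :=
  (PySem.List.pyRange p n 1).all (fun j =>
    PySem.List.pyGetD l j ' ' == PySem.List.pyGetD l (j - p) ' ')

-- the for-loop with early return: first p in the list passing pvCheck, else the final `return n`
def pvFind (l : List Char) (n : Int) : List Int → Int
  | [] => n
  | p :: ps => if pvCheck l n p then p else pvFind l n ps

def cyclicString_alt (s : String) : Int :=
  let l := s.toList
  let n : Int := l.length
  pvFind l n (PySem.List.pyRange 1 (n + 1) 1)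

-- ===== PRECONDITION & SPEC =====
-- On length-2 strings with both characters equal A returns 2 (its loop refuses to record a border
-- at index n-1 unless a smaller one exists), while B returns the intended smallest period 1.
def D_cyclicString (s : String) : Prop :=
  s.toList.length = 2 ∧ s.toList.getD 0 ' ' = s.toList.getD 1 ' '
instance (s : String) : Decidable (D_cyclicString s) := by unfold D_cyclicString; infer_instance

def Spec_cyclicString (s : String) (out : Int) : Prop := ¬ D_cyclicString s → out = cyclicString_alt s
instance (s : String) (out : Int) : Decidable (Spec_cyclicString s out) := by unfold Spec_cyclicString; infer_instance

def pvDiffWitness_cyclicString : String := "aa"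
def pvDiffWitnessOut_cyclicString : Int × Int := (2, 1)

-- ===== CLAIM (what is proved, stated in full; the proofs are below) =====
def Claim_unchanged_cyclicString : Prop := ∀ (s : String), Dom_cyclicString s → Spec_cyclicString s (cyclicString s)
def Claim_changed_cyclicString : Prop := Dom_cyclicString (pvDiffWitness_cyclicString) ∧ D_cyclicString (pvDiffWitness_cyclicString) ∧ cyclicString (pvDiffWitness_cyclicString) = pvDiffWitnessOut_cyclicString.1 ∧ cyclicString_alt (pvDiffWitness_cyclicString) = pvDiffWitnessOut_cyclicString.2 ∧ pvDiffWitnessOut_cyclicString.1 ≠ pvDiffWitnessOut_cyclicString.2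
def Claim_exact_cyclicString : Prop := ∀ (s : String), Dom_cyclicString s → D_cyclicString s → cyclicString s ≠ cyclicString_alt s

-- ===== LEMMAS AND PROOFS =====

def pvBord (l : List Char) (k : Nat) : Bool := decide (l.drop (l.length - k) = l.take k)

theorem endswith_take (l : List Char) (i : Nat) (h : i ≤ l.length) :
    PySem.Chars.endswith l (PySem.List.slice l none (some (i : Int))) = pvBord l i := by
  rw [show PySem.List.slice l none (some (i:Int)) = l.take i from PySem.List.slice_to_natCast l i]
  rw [Bool.eq_iff_iff, PySem.Chars.endswith_iff, pvBord, decide_eq_true_iff,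
    List.suffix_iff_eq_drop, List.length_take, Nat.min_eq_left h, eq_comm]

theorem check_bord (l : List Char) (p : Nat) (hp1 : 1 ≤ p) (hp : p ≤ l.length) :
    pvCheck l (l.length : Int) (p : Int) = pvBord l (l.length - p) := by
  rw [Bool.eq_iff_iff, pvCheck, List.all_eq_true, pvBord, decide_eq_true_iff]
  rw [Nat.sub_sub_self hp]
  constructor
  · intro hall
    apply List.ext_getElem
    · simp
    · intro m h1 h2
      have hm : m < l.length - p := by simpa using h2
      have := hall ((p + m : Nat) : Int) (by
        rw [PySem.List.mem_pyRange_one]; push_cast; omega)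
      rw [beq_iff_eq] at this
      rw [List.getElem_drop, List.getElem_take]
      have e1 : PySem.List.pyGetD l ((p + m : Nat) : Int) ' ' = l[p + m] :=
        PySem.List.pyGetD_ofNat l (p + m) ' ' (by omega)
      have e2 : PySem.List.pyGetD l (((p + m : Nat) : Int) - (p:Int)) ' ' = l[m] := by
        rw [show ((p + m : Nat) : Int) - (p:Int) = ((m : Nat) : Int) by push_cast; ring]
        exact PySem.List.pyGetD_ofNat l m ' ' (by omega)
      rw [e1, e2] at this
      simpa using this
  · intro heq j hj
    rw [PySem.List.mem_pyRange_one] at hj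
    obtain ⟨hj1, hj2⟩ := hj
    rw [beq_iff_eq]
    have hjn : j.toNat < l.length := by omega
    have hjp : (p:Nat) ≤ j.toNat := by omega
    have e1 : PySem.List.pyGetD l j ' ' = l[j.toNat] :=
      PySem.List.pyGetD_eq_getElem l ' ' (by omega) (by omega)
    have e2 : PySem.List.pyGetD l (j - p) ' ' = l[(j - p).toNat] :=
      PySem.List.pyGetD_eq_getElem l ' ' (by omega) (by omega)
    rw [e1, e2]
    have hm : j.toNat - p < (l.take (l.length - p)).length := by simp; omega
    have := congrArg (fun t => t[j.toNat - p]?) heq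
    simp only [List.getElem?_drop, List.getElem?_take] at this
    have h1 : p + (j.toNat - p) = j.toNat := by omega
    have h2 : (j - p).toNat = j.toNat - p := by omega
    rw [h1] at this
    have hlt : j.toNat - p < l.length - p := by omega
    simp only [hlt, if_pos] at this
    rw [List.getElem?_eq_getElem hjn, List.getElem?_eq_getElem (by omega)] at this
    exact (Option.some.inj this).trans (getElem_congr rfl h2.symm (by omega))

theorem find_pyRange (l : List Char) (d : Int) (a p b : Int) (ha : a ≤ p) (hpb : p < b)
    (hp : pvCheck l d p = true)
    (hmin : ∀ q, a ≤ q → q < p → pvCheck l d q = false) :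
    pvFind l d (PySem.List.pyRange a b 1) = p := by
  have hk : (p - a).toNat = (p - a).toNat := rfl
  generalize hgen : (p - a).toNat = k at hk
  clear hk
  induction k generalizing a with
  | zero =>
    have : a = p := by omega
    subst this
    rw [PySem.List.pyRange_one_cons (by omega), pvFind, if_pos hp]
  | succ k ih =>
    have halt : a < p := by omega
    rw [PySem.List.pyRange_one_cons (by omega), pvFind, if_neg (by simp [hmin a le_rfl halt])]
    exact ih (a + 1) (by omega) (fun q h1 h2 => hmin q (by omega) h2) (by omega)

theorem pvFindGreatest_pos (P : Nat → Prop) [DecidablePred P] (n : Nat)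
    (h : 0 < Nat.findGreatest P n) : P (Nat.findGreatest P n) := by
  induction n with
  | zero => simp at h
  | succ n ih =>
    rw [Nat.findGreatest_succ] at h ⊢
    split
    · assumption
    · rw [if_neg (by assumption)] at h
      exact ih h

theorem bord_one_of_bord_pred (l : List Char) (h3 : 3 ≤ l.length)
    (h : pvBord l (l.length - 1) = true) : pvBord l 1 = true := by
  rw [pvBord, decide_eq_true_iff] at h ⊢
  rw [show l.length - (l.length - 1) = 1 by omega] at h
  -- h : l.drop 1 = l.take (l.length - 1); all characters are equal
  have step : ∀ j, (hj : j + 1 < l.length) → l[j + 1]'hj = l[j]'(by omega) := by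
    intro j hj
    have := congrArg (fun t => t[j]?) h
    simp only [List.getElem?_drop, List.getElem?_take] at this
    rw [if_pos (by omega), List.getElem?_eq_getElem (by omega : 1 + j < l.length),
      List.getElem?_eq_getElem (by omega)] at this
    exact (getElem_congr rfl (by omega : j + 1 = 1 + j) (by omega)).trans (Option.some.inj this)
  have alleq : ∀ j, (hj : j < l.length) → l[j] = l[0]'(by omega) := by
    intro j
    induction j with
    | zero => intro _; rfl
    | succ j ih => intro hj; rw [step j (by omega), ih (by omega)]
  apply List.ext_getElem
  · simp; omega
  · intro m h1 h2
    have hm : m = 0 := by simp at h1; omega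
    subst hm
    rw [List.getElem_drop, List.getElem_take]
    exact (getElem_congr rfl (by omega : l.length - 1 + 0 = l.length - 1) (by omega)).trans
      (alleq (l.length - 1) (by omega))

theorem loopA_prefix (l : List Char) (m : Nat) (hm : m + 2 ≤ l.length) :
    (PySem.List.pyRange 1 (1 + (m : Int)) 1).foldl (fun index i =>
      if PySem.Chars.endswith l (PySem.List.slice l none (some i)) then
        if i ≠ (l.length : Int) - 1 then i
        else if index ≥ 0 then i else index
      else index) (-1)
    = (if Nat.findGreatest (fun k => pvBord l k = true) m = 0 then (-1 : Int)
       else (Nat.findGreatest (fun k => pvBord l k = true) m : Int)) := by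
  induction m with
  | zero => rw [PySem.List.pyRange_one_eq_nil (by omega)]; simp
  | succ m ih =>
    rw [show (1 + ((m + 1 : Nat) : Int)) = (1 + (m : Int)) + 1 by push_cast; ring,
      PySem.List.pyRange_one_succ_right (by omega), List.foldl_append, ih (by omega)]
    simp only [List.foldl_cons, List.foldl_nil]
    rw [show (1 + (m : Int)) = ((m + 1 : Nat) : Int) by push_cast; ring,
      endswith_take l (m + 1) (by omega)]
    rw [Nat.findGreatest_succ]
    by_cases hb : pvBord l (m + 1) = true
    · rw [if_pos hb, if_pos hb, if_pos (by push_cast; omega), if_neg (by omega)]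
    · simp [hb]

theorem altB (l : List Char) (h1 : 1 ≤ l.length) :
    pvFind l (l.length : Int) (PySem.List.pyRange 1 ((l.length : Int) + 1) 1)
      = ((l.length - Nat.findGreatest (fun k => pvBord l k = true) (l.length - 1) : Nat) : Int) := by
  set K := Nat.findGreatest (fun k => pvBord l k = true) (l.length - 1) with hK
  have hKle : K ≤ l.length - 1 := Nat.findGreatest_le _
  apply find_pyRange
  · omega
  · omega
  · rw [show ((l.length - K : Nat) : Int) = ((l.length - K : Nat) : Int) from rfl,
      check_bord l (l.length - K) (by omega) (by omega)]
    rw [show l.length - (l.length - K) = K by omega]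
    by_cases hK0 : K = 0
    · rw [hK0, pvBord, decide_eq_true_iff]
      simp
    · exact pvFindGreatest_pos _ _ (by rw [← hK]; omega)
  · intro q hq1 hq2
    have hqn : q = ((q.toNat : Nat) : Int) := by omega
    rw [hqn, check_bord l q.toNat (by omega) (by omega)]
    by_contra hcon
    rw [Bool.not_eq_false] at hcon
    exact Nat.findGreatest_is_greatest (by omega : K < l.length - q.toNat) (by omega)
      hcon

def pvA (l : List Char) : Int :=
  let n : Int := l.length
  let index : Int := (PySem.List.pyRange 1 n 1).foldl (fun index i =>
      if PySem.Chars.endswith l (PySem.List.slice l none (some i)) then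
        if i ≠ (l.length : Int) - 1 then i
        else if index ≥ 0 then i else index
      else index) (-1)
  let res := if index ≥ 0 then PySem.List.slice l (some index) none else l
  (res.length : Int)

theorem port_eq (l : List Char) (hD : ¬(l.length = 2 ∧ l.getD 0 ' ' = l.getD 1 ' ')) :
    pvA l = pvFind l (l.length : Int) (PySem.List.pyRange 1 ((l.length : Int) + 1) 1) := by
  by_cases h0 : l.length = 0
  · obtain rfl : l = [] := List.length_eq_zero_iff.mp h0
    rfl
  rw [altB l (by omega)]
  by_cases h1 : l.length = 1
  · rw [pvA]
    simp only [h1]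
    rw [show ((1:Nat):Int) = (1:Int) by norm_num, PySem.List.pyRange_one_eq_nil (by omega)]
    norm_num
    exact h1
  have h2 : 2 ≤ l.length := by omega
  have hKsucc : Nat.findGreatest (fun k => pvBord l k = true) (l.length - 1)
      = if pvBord l (l.length - 1) = true then l.length - 1
        else Nat.findGreatest (fun k => pvBord l k = true) (l.length - 2) := by
    rw [show l.length - 1 = (l.length - 2) + 1 by omega, Nat.findGreatest_succ]
  rw [pvA]
  rw [show (l.length : Int) = ((l.length : Int) - 1) + 1 by ring,
    PySem.List.pyRange_one_succ_right (by omega), List.foldl_append,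
    show ((l.length : Int) - 1) + 1 = (l.length : Int) by ring]
  rw [show (PySem.List.pyRange 1 ((l.length : Int) - 1) 1)
      = (PySem.List.pyRange 1 (1 + ((l.length - 2 : Nat) : Int)) 1) by
    congr 1; omega]
  rw [loopA_prefix l (l.length - 2) (by omega)]
  simp only [List.foldl_cons, List.foldl_nil]
  rw [show ((l.length : Int) - 1) = ((l.length - 1 : Nat) : Int) by omega,
    endswith_take l (l.length - 1) (by omega)]
  by_cases hb : pvBord l (l.length - 1) = true
  · -- all characters equal
    rcases Nat.lt_or_ge l.length 3 with h3 | h3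
    · -- l.length = 2 : contradiction with hD
      exfalso
      have hlen : l.length = 2 := by omega
      rw [pvBord, decide_eq_true_iff, hlen] at hb
      apply hD
      refine ⟨hlen, ?_⟩
      have := congrArg (fun t => t.getD 0 ' ') hb
      simp only [List.getD, List.getElem?_drop, List.getElem?_take] at this
      simpa [List.getD_eq_getElem?_getD, hlen] using this.symm
    · have hb1 : pvBord l 1 = true := bord_one_of_bord_pred l h3 hb
      have hG1 : 1 ≤ Nat.findGreatest (fun k => pvBord l k = true) (l.length - 2) :=
        Nat.le_findGreatest (by omega) hb1
      rw [if_neg (by omega : ¬ Nat.findGreatest (fun k => pvBord l k = true) (l.length - 2) = 0)]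
      rw [if_pos hb, if_neg (by simp :
          ¬ ((l.length - 1 : Nat) : Int) ≠ ((l.length - 1 : Nat) : Int)),
        if_pos (by omega : ((Nat.findGreatest (fun k => pvBord l k = true) (l.length - 2) : Nat) : Int) ≥ 0),
        if_pos (by omega : ((l.length - 1 : Nat) : Int) ≥ 0)]
      rw [hKsucc, if_pos hb, PySem.List.slice_from_natCast]
      simp only [List.length_drop]
  · rw [if_neg hb, hKsucc, if_neg hb]
    by_cases hG0 : Nat.findGreatest (fun k => pvBord l k = true) (l.length - 2) = 0
    · rw [if_pos hG0, if_neg (by omega : ¬ (-1 : Int) ≥ 0), hG0]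
      omega
    · rw [if_neg hG0, if_pos (by omega : ((Nat.findGreatest (fun k => pvBord l k = true) (l.length - 2) : Nat) : Int) ≥ 0),
        PySem.List.slice_from_natCast]
      simp only [List.length_drop]

theorem pvA_pair (a : Char) : pvA [a, a] = 2 := by
  rw [pvA]
  rw [show ((([a, a] : List Char).length : Int)) = 2 from rfl,
    show PySem.List.pyRange 1 2 1 = [1] by decide]
  simp only [List.foldl_cons, List.foldl_nil]
  rw [show PySem.List.slice [a, a] none (some 1) = [a] from rfl,
    show PySem.Chars.endswith [a, a] [a] = true from
      (PySem.Chars.endswith_iff _ _).mpr ⟨[a], rfl⟩]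
  norm_num

theorem pvB_pair (a : Char) : pvFind [a, a] 2 (PySem.List.pyRange 1 3 1) = 1 := by
  rw [show PySem.List.pyRange 1 3 1 = [1, 2] by decide, pvFind]
  rw [if_pos (by
    rw [pvCheck, show PySem.List.pyRange 1 2 1 = [1] by decide]
    simp [PySem.List.pyGetD])]

theorem list_pair (l : List Char) (h : l.length = 2) : ∃ a b, l = [a, b] := by
  match l, h with
  | [a, b], _ => exact ⟨a, b, rfl⟩


theorem spec_main (s : String) (hD : ¬ D_cyclicString s) : cyclicString s = cyclicString_alt s :=
  port_eq s.toList hD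

-- ===== VERDICT (by name: the statement is the Claim_ definition above) =====
theorem cyclicString_spec : Claim_unchanged_cyclicString := by
  intro s _ hD
  exact spec_main s hD

theorem cyclicString_changed : Claim_changed_cyclicString := by
  unfold Claim_changed_cyclicString; decide

theorem cyclicString_tight : Claim_exact_cyclicString := by
  intro s _ hD
  obtain ⟨hlen, hab⟩ := hD
  obtain ⟨a, b, hl⟩ := list_pair s.toList hlen
  have hba : b = a := by rw [hl] at hab; simpa [List.getD] using hab.symm
  subst hba
  have hA : cyclicString s = 2 := by
    show pvA s.toList = 2
    rw [hl]; exact pvA_pair b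
  have hB : cyclicString_alt s = 1 := by
    show pvFind s.toList (s.toList.length : Int) (PySem.List.pyRange 1 ((s.toList.length : Int) + 1) 1) = 1
    rw [hl]
    exact pvB_pair b
  rw [hA, hB]
  decide
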